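-- pv_equiv track=rewrite | github.com/Nmdk1/StrideIQ | apps/api/services/shape_extractor.py | _consolidate_same_zone
-- ===== SOURCE A (Python) =====
-- from typing import Dict, List, Optional, Tuple
--
-- def _consolidate_same_zone(
--     blocks: List[Tuple[int, int, str]],
-- ) -> List[Tuple[int, int, str]]:
--     """Merge adjacent blocks that share the same zone."""
--     if len(blocks) <= 1:
--         return blocks
--     result = [blocks[0]]
--     for start, end, zone in blocks[1:]:
--         if zone == result[-1][2]:
--             result[-1] = (result[-1][0], end, zone)
--         else:
--             result.append((start, end, zone))
--     return result
-- ===== SOURCE B (Python) =====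
-- from typing import List, Tuple
--
-- def _consolidate_same_zone(
--     blocks: List[Tuple[int, int, str]],
-- ) -> List[Tuple[int, int, str]]:
--     """Merge adjacent blocks that share the same zone (divide and conquer)."""
--     if len(blocks) <= 1:
--         return blocks
--     mid = len(blocks) // 2
--     left = _consolidate_same_zone(blocks[:mid])
--     right = _consolidate_same_zone(blocks[mid:])
--     if left[-1][2] == right[0][2]:
--         return left[:-1] + [(left[-1][0], right[0][1], right[0][2])] + right[1:]
--     return left + right
-- ===== Notes on version B (the rewrite author's own statement) =====
-- stated objective: alternative
-- what changed: Replaces A's single left-to-right fold that rewrites result[-1] with a divide-and-conquer: split the list in half, consolidate each half recursively, then merge the two consolidated halves by fusing the boundary runs if they share a zone.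
import Mathlib
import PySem

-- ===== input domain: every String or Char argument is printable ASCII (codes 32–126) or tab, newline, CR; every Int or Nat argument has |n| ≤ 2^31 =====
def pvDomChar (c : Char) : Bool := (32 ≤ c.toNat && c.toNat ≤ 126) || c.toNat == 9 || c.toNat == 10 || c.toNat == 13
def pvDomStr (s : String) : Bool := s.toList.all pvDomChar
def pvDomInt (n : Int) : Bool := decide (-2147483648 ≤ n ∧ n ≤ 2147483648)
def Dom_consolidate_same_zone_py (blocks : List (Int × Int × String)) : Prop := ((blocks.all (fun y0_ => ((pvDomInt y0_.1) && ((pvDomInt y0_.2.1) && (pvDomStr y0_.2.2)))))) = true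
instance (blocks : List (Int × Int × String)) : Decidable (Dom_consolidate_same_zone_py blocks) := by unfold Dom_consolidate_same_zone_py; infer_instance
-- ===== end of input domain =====

-- B replaces A's left-to-right fold that rewrites result[-1] by divide and conquer:
-- consolidate each half recursively, then fuse the boundary runs if they share a zone.


-- ===== PORT A =====
-- loop step: 'result[-1]' is the head of the reversed accumulator; the final reverse
-- restores Python's append order.
def pvStepA (acc : List (Int × Int × String)) (x : Int × Int × String) : List (Int × Int × String) :=
  match acc with
  | last :: prev => if x.2.2 == last.2.2 then (last.1, x.2.1, x.2.2) :: prev else x :: last :: prev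
  | [] => [x]

def consolidate_same_zone_py (blocks : List (Int × Int × String)) : List (Int × Int × String) :=
  if blocks.length ≤ 1 then blocks
  else
    match blocks with
    | [] => []
    | b :: rest => (rest.foldl pvStepA [b]).reverse

-- ===== PORT B =====
-- boundary merge: 'left[:-1] + [(left[-1][0], right[0][1], right[0][2])] + right[1:]'
-- (both halves B passes are nonempty; the catch-all only totalises the match)
def pvMergeRuns (l r : List (Int × Int × String)) : List (Int × Int × String) :=
  match l.getLast?, r with
  | some a, b :: rt => if a.2.2 == b.2.2 then l.dropLast ++ (a.1, b.2.1, b.2.2) :: rt else l ++ r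
  | _, _ => l ++ r

-- divide and conquer; blocks[:mid] / blocks[mid:] with 0 ≤ mid ≤ len are exactly take/drop
def consolidate_same_zone_py_alt (blocks : List (Int × Int × String)) : List (Int × Int × String) :=
  if h : blocks.length ≤ 1 then blocks
  else
    -- mid = len(blocks) // 2  (len ≥ 0, so Nat '/' agrees with Python '//')
    pvMergeRuns (consolidate_same_zone_py_alt (blocks.take (blocks.length / 2)))
                (consolidate_same_zone_py_alt (blocks.drop (blocks.length / 2)))
termination_by blocks.length
decreasing_by
  · simp only [List.length_take]; omega
  · simp only [List.length_drop]; omega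

-- ===== PRECONDITION & SPEC =====
def Spec_consolidate_same_zone_py (blocks : List (Int × Int × String)) (out : List (Int × Int × String)) : Prop := out = consolidate_same_zone_py_alt blocks
instance (blocks : List (Int × Int × String)) (out : List (Int × Int × String)) : Decidable (Spec_consolidate_same_zone_py blocks out) := by unfold Spec_consolidate_same_zone_py; infer_instance

-- ===== CLAIM (what is proved, stated in full; the proofs are below) =====
def Claim_equal_consolidate_same_zone_py : Prop := ∀ (blocks : List (Int × Int × String)), Dom_consolidate_same_zone_py blocks → Spec_consolidate_same_zone_py blocks (consolidate_same_zone_py blocks)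

-- ===== LEMMAS AND PROOFS =====

-- reference recursion both ports are reduced to
def pvCons2 (b : Int × Int × String) : List (Int × Int × String) → List (Int × Int × String)
  | [] => [b]
  | x :: rest => if x.2.2 == b.2.2 then pvCons2 (b.1, x.2.1, x.2.2) rest else b :: pvCons2 x rest

def pvConsol : List (Int × Int × String) → List (Int × Int × String)
  | [] => []
  | b :: rest => pvCons2 b rest

-- the A-side loop never touches entries below the current last element
theorem pvFoldA_append (rest : List (Int × Int × String)) :
    ∀ (last : Int × Int × String) (prev : List (Int × Int × String)),
      rest.foldl pvStepA (last :: prev) = rest.foldl pvStepA [last] ++ prev := by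
  induction rest with
  | nil => intro last prev; simp
  | cons x rs ih =>
      intro last prev
      simp only [List.foldl_cons, pvStepA]
      split
      · rw [ih]
      · rw [ih, ih x [last]]; simp

theorem pvFoldA_eq_cons2 (rest : List (Int × Int × String)) :
    ∀ (b : Int × Int × String), (rest.foldl pvStepA [b]).reverse = pvCons2 b rest := by
  induction rest with
  | nil => intro b; simp [pvCons2]
  | cons x rs ih =>
      intro b
      simp only [List.foldl_cons, pvStepA, pvCons2]
      split
      · exact ih _
      · rw [pvFoldA_append, List.reverse_append]
        simp [ih x]

-- restart: replace the start field of the head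
def pvRestart (s : Int) : List (Int × Int × String) → List (Int × Int × String)
  | [] => []
  | (_, e, z) :: t => (s, e, z) :: t

-- pvCons2's result depends on its seed's start only through the head's start
theorem pvCons2_restart (rs : List (Int × Int × String)) :
    ∀ (e : Int) (z : String) (s1 s2 : Int),
      pvCons2 (s1, e, z) rs = pvRestart s1 (pvCons2 (s2, e, z) rs) := by
  induction rs with
  | nil => intro e z s1 s2; simp [pvCons2, pvRestart]
  | cons y ys ih =>
      intro e z s1 s2
      simp only [pvCons2]
      split
      · exact ih _ _ _ _
      · simp [pvRestart]

-- shape: pvCons2 b rs starts with (b.1, _, b.2.2)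
theorem pvCons2_shape (rs : List (Int × Int × String)) :
    ∀ (b : Int × Int × String), ∃ e t, pvCons2 b rs = (b.1, e, b.2.2) :: t := by
  induction rs with
  | nil => intro b; exact ⟨b.2.1, [], by simp [pvCons2]⟩
  | cons y ys ih =>
      intro b
      simp only [pvCons2]
      split
      · obtain ⟨e, t, ht⟩ := ih (b.1, y.2.1, y.2.2)
        next h => exact ⟨e, t, by rw [ht]; simp [eq_of_beq h]⟩
      · exact ⟨b.2.1, pvCons2 y ys, rfl⟩

theorem pvMergeRuns_cons (b a : Int × Int × String) (L R : List (Int × Int × String)) :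
    pvMergeRuns (b :: a :: L) R = b :: pvMergeRuns (a :: L) R := by
  cases R with
  | nil => simp [pvMergeRuns]
  | cons r0 rt =>
      rcases h : (a :: L).getLast? with _ | x
      · simp at h
      · simp only [pvMergeRuns, List.getLast?_cons_cons, h,
          List.dropLast_cons_of_ne_nil (List.cons_ne_nil a L)]
        split <;> rfl

-- single-seed case: consolidating b::ys = merging [b] with the consolidated ys
theorem pvCons2_merge_single (ys : List (Int × Int × String)) :
    ∀ (b : Int × Int × String), pvCons2 b ys = pvMergeRuns [b] (pvConsol ys) := by
  intro b
  cases ys with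
  | nil => simp [pvCons2, pvConsol, pvMergeRuns]
  | cons x ys' =>
      obtain ⟨e, t, ht⟩ := pvCons2_shape ys' x
      simp only [pvCons2, pvConsol, ht, pvMergeRuns, List.getLast?_singleton]
      by_cases h : x.2.2 == b.2.2
      · simp only [h, if_pos]
        have hrestart := pvCons2_restart ys' x.2.1 x.2.2 b.1 x.1
        rw [show ((x.1 : Int), x.2.1, x.2.2) = x from rfl, ht] at hrestart
        simp only [pvRestart] at hrestart
        rw [← eq_of_beq h]
        simpa using hrestart
      · have h' : (b.2.2 == x.2.2) = false := by
          rw [beq_eq_false_iff_ne]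
          intro hx
          exact h (by simp [hx])
        simp [h, h']

-- main merge law: consolidation splits across ++
theorem pvConsol_append (xs : List (Int × Int × String)) :
    ∀ (b : Int × Int × String) (ys : List (Int × Int × String)),
      pvCons2 b (xs ++ ys) = pvMergeRuns (pvCons2 b xs) (pvConsol ys) := by
  induction xs with
  | nil => intro b ys; simpa [pvCons2] using pvCons2_merge_single ys b
  | cons y xs' ih =>
      intro b ys
      simp only [List.cons_append, pvCons2]
      split
      · exact ih _ ys
      · rw [ih y ys]
        obtain ⟨e, t, ht⟩ := pvCons2_shape xs' y
        rw [ht, pvMergeRuns_cons]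

theorem pvAlt_eq_consol : ∀ (blocks : List (Int × Int × String)),
    consolidate_same_zone_py_alt blocks = pvConsol blocks := by
  intro blocks
  induction hn : blocks.length using Nat.strong_induction_on generalizing blocks with
  | _ n ih =>
      rw [consolidate_same_zone_py_alt]
      split
      · next h =>
          match blocks with
          | [] => simp [pvConsol]
          | [b] => simp [pvConsol, pvCons2]
          | a :: b :: t => simp at h
      · next h =>
          subst hn
          have h2 : 2 ≤ blocks.length := by omega
          have hmid1 : 1 ≤ blocks.length / 2 := by omega
          have hmid2 : blocks.length / 2 < blocks.length := by omega
          rw [ih _ (by rw [List.length_take]; omega) _ rfl,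
              ih _ (by rw [List.length_drop]; omega) _ rfl]
          rcases htake : blocks.take (blocks.length / 2) with _ | ⟨b, L⟩
          · exfalso
            have h0 := congrArg List.length htake
            rw [List.length_take] at h0
            simp only [List.length_nil] at h0
            omega
          · have hsplit : blocks = (b :: L) ++ blocks.drop (blocks.length / 2) := by
              rw [← htake, List.take_append_drop]
            conv_rhs => rw [hsplit]
            simp only [pvConsol, List.cons_append]
            rw [pvConsol_append]
            rfl

-- ===== VERDICT (by name: the statement is the Claim_ definition above) =====
theorem consolidate_same_zone_py_spec : Claim_equal_consolidate_same_zone_py := by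
  intro blocks _
  show consolidate_same_zone_py blocks = consolidate_same_zone_py_alt blocks
  rw [pvAlt_eq_consol]
  cases blocks with
  | nil => simp [consolidate_same_zone_py, pvConsol]
  | cons b rest =>
      rw [consolidate_same_zone_py]
      cases rest with
      | nil => simp [pvConsol, pvCons2]
      | cons x rs =>
          simp only [pvConsol, List.length_cons, Nat.succ_le_iff]
          rw [if_neg (by simp)]
          exact pvFoldA_eq_cons2 (x :: rs) b
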